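-- pv_equiv track=rewrite | github.com/PabMM/TCASI-ANN-SDM-VE | SCHEMES/branches_scheme.py | divide_vectors
-- ===== SOURCE A (Python) =====
-- def divide_vectors(x, y):
--     divisions = []
--     start = 0
--     increasing = None
--
--     for i in range(1, len(y)):
--         if increasing is None:
--             if y[i] > y[i - 1]:
--                 increasing = True
--             elif y[i] < y[i - 1]:
--                 increasing = False
--         elif increasing and y[i] < y[i - 1]:
--             divisions.append((x[start:i], y[start:i]))
--             start = i
--             increasing = False
--         elif not increasing and y[i] > y[i - 1]:
--             divisions.append((x[start:i], y[start:i]))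
--             start = i
--             increasing = True
--
--     divisions.append((x[start:], y[start:]))  # Append the last division
--
--     return divisions
-- ===== SOURCE B (Python) =====
-- def divide_vectors(x, y):
--     n = len(y)
--     # Stage 1: stream of step directions (+1 up, -1 down, 0 tie).
--     dirs = [(y[i] > y[i - 1]) - (y[i] < y[i - 1]) for i in range(1, n)]
--     # Stage 2: forward-fill ties with the previous direction; leading ties take
--     # the first real direction (ties never start a new segment).
--     first = 0
--     for d in dirs:
--         if d:
--             first = d
--             break
--     prev = first
--     filled = []
--     for d in dirs:
--         if d:
--             prev = d
--         filled.append(prev)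
--     # Stage 3: run-length encode the filled direction stream.
--     runs = []
--     for f in filled:
--         if runs and runs[-1][0] == f:
--             runs[-1][1] += 1
--         else:
--             runs.append([f, 1])
--     # Stage 4: run lengths -> segment lengths (first run also owns y[0]).
--     lens = [runs[0][1] + 1] + [r[1] for r in runs[1:]] if runs else [n]
--     # Stage 5: cut both vectors by those lengths (last segment open-ended).
--     segs = []
--     pos = 0
--     for L in lens[:-1]:
--         segs.append((x[pos:pos + L], y[pos:pos + L]))
--         pos += L
--     segs.append((x[pos:], y[pos:]))
--     return segs
-- ===== Notes on version B (the rewrite author's own statement) =====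
-- stated objective: alternative
-- what changed: A splits eagerly in one pass carrying (divisions, start, increasing); B is a staged pipeline: compute the signed-difference stream, forward-fill ties (leading ties get the first real direction), run-length encode it, convert run lengths to segment lengths, and cut both vectors by those lengths.
import Mathlib
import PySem

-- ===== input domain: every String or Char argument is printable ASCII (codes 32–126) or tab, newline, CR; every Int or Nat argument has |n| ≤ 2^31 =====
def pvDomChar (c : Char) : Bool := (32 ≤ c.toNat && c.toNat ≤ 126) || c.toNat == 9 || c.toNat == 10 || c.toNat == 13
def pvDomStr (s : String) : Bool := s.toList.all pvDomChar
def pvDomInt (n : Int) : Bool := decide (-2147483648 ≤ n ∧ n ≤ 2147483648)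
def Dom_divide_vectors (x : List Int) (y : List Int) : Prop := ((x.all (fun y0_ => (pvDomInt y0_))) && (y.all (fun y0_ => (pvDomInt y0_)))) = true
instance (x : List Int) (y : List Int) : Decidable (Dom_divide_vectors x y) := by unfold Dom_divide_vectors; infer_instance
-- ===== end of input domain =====

-- B replaces A's one-pass segment accumulator by a staged pipeline (direction stream,
-- forward-fill of ties, run-length encoding, cut by segment lengths); alternative
-- decomposition, same cost.

-- ===== PORT A =====
-- loop body of A's 'for i in range(1, len(y))', state = (divisions, start, increasing)
def dvA_step (x y : List Int) (s : List (List Int × List Int) × Int × Option Bool) (i : Int) :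
    List (List Int × List Int) × Int × Option Bool :=
  match s.2.2 with
  | none =>
      if PySem.List.pyGetD y i 0 > PySem.List.pyGetD y (i-1) 0 then (s.1, s.2.1, some true)
      else if PySem.List.pyGetD y i 0 < PySem.List.pyGetD y (i-1) 0 then (s.1, s.2.1, some false)
      else s
  | some true =>
      if PySem.List.pyGetD y i 0 < PySem.List.pyGetD y (i-1) 0 then
        (s.1 ++ [(PySem.List.slice x (some s.2.1) (some i), PySem.List.slice y (some s.2.1) (some i))],
         i, some false)
      else s
  | some false =>
      if PySem.List.pyGetD y i 0 > PySem.List.pyGetD y (i-1) 0 then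
        (s.1 ++ [(PySem.List.slice x (some s.2.1) (some i), PySem.List.slice y (some s.2.1) (some i))],
         i, some true)
      else s

def divide_vectors (x : List Int) (y : List Int) : List (List Int × List Int) :=
  let st := (PySem.List.pyRange 1 (y.length : Int) 1).foldl (dvA_step x y) ([], 0, none)
  st.1 ++ [(PySem.List.slice x (some st.2.1) none, PySem.List.slice y (some st.2.1) none)]

-- ===== PORT B =====
-- stage 1: '(y[i] > y[i-1]) - (y[i] < y[i-1])' for i in range(1, n)
def dvB_dir (y : List Int) (i : Int) : Int :=
  (if PySem.List.pyGetD y i 0 > PySem.List.pyGetD y (i-1) 0 then 1 else 0) -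
  (if PySem.List.pyGetD y i 0 < PySem.List.pyGetD y (i-1) 0 then 1 else 0)

def dvB_dirs (y : List Int) : List Int :=
  (PySem.List.pyRange 1 (y.length : Int) 1).map (dvB_dir y)

-- stage 2a: 'for d in dirs: if d: first = d; break'
def dvB_first : List Int → Int
  | [] => 0
  | d :: rest => if d ≠ 0 then d else dvB_first rest

-- stage 2b body: state = (prev, filled)
def dvB_fillStep (s : Int × List Int) (d : Int) : Int × List Int :=
  let p := if d ≠ 0 then d else s.1
  (p, s.2 ++ [p])

-- stage 2: 'prev = first; filled = []; for d in dirs: if d: prev = d; filled.append(prev)'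
def dvB_fill (dirs : List Int) : Int × List Int := dirs.foldl dvB_fillStep (dvB_first dirs, [])

-- stage 3 body: 'if runs and runs[-1][0] == f: runs[-1][1] += 1 else: runs.append([f, 1])'
def dvB_addRun (runs : List (Int × Int)) (f : Int) : List (Int × Int) :=
  match runs.getLast? with
  | some r => if r.1 = f then runs.dropLast ++ [(r.1, r.2 + 1)] else runs ++ [(f, 1)]
  | none => [(f, 1)]

-- stage 3: run-length encoding of the filled stream
def dvB_runs (dirs : List Int) : List (Int × Int) := (dvB_fill dirs).2.foldl dvB_addRun []

-- stage 4: '[runs[0][1] + 1] + [r[1] for r in runs[1:]] if runs else [n]'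
def dvB_lens (n : Int) (runs : List (Int × Int)) : List Int :=
  match runs with
  | [] => [n]
  | r :: rest => (r.2 + 1) :: rest.map (·.2)

-- stage 5 body: state = (segs, pos)
def dvB_cut (x y : List Int) (s : List (List Int × List Int) × Int) (L : Int) :
    List (List Int × List Int) × Int :=
  (s.1 ++ [(PySem.List.slice x (some s.2) (some (s.2 + L)),
            PySem.List.slice y (some s.2) (some (s.2 + L)))], s.2 + L)

def divide_vectors_alt (x : List Int) (y : List Int) : List (List Int × List Int) :=
  let lens := dvB_lens (y.length : Int) (dvB_runs (dvB_dirs y))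
  let c := (PySem.List.slice lens none (some (-1))).foldl (dvB_cut x y) ([], 0)
  c.1 ++ [(PySem.List.slice x (some c.2) none, PySem.List.slice y (some c.2) none)]

-- ===== PRECONDITION & SPEC =====
def Spec_divide_vectors (x : List Int) (y : List Int) (out : List (List Int × List Int)) : Prop := out = divide_vectors_alt x y
instance (x : List Int) (y : List Int) (out : List (List Int × List Int)) : Decidable (Spec_divide_vectors x y out) := by unfold Spec_divide_vectors; infer_instance

-- ===== CLAIM (what is proved, stated in full; the proofs are below) =====
def Claim_equal_divide_vectors : Prop := ∀ (x : List Int) (y : List Int), Dom_divide_vectors x y → Spec_divide_vectors x y (divide_vectors x y)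

-- ===== LEMMAS AND PROOFS =====

-- A's reference single-pass breakpoint fold (proof-side): state = (breaks, last direction)
def dvO_step (y : List Int) (s : List Int × Int) (i : Int) : List Int × Int :=
  let d : Int := dvB_dir y i
  if d ≠ 0 then
    (if s.2 ≠ 0 ∧ d ≠ s.2 then s.1 ++ [i] else s.1, d)
  else s

-- A's 'increasing' flag as a function of the direction int
def dirOpt (last : Int) : Option Bool :=
  if last = 1 then some true else if last = -1 then some false else none

-- the segments determined by a breakpoint list
def pairsOf (x y : List Int) (bs : List Int) : List (List Int × List Int) :=
  ((0 :: bs).zip bs).map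
    (fun p => (PySem.List.slice x (some p.1) (some p.2), PySem.List.slice y (some p.1) (some p.2)))

-- abstraction: reference state as the A-state it represents
def absB (x y : List Int) (s : List Int × Int) : List (List Int × List Int) × Int × Option Bool :=
  (pairsOf x y s.1, s.1.getLastD 0, dirOpt s.2)

theorem getD_getLast?_cons (a d : Int) (ds : List Int) :
    (d :: ds).getLast?.getD a = (d :: ds).getLast (by simp) := by
  rw [List.getLast?_eq_some_getLast (by simp)]; simp

theorem zip_pairs_append (h : Int) (bs : List Int) (i : Int) :
    (h :: (bs ++ [i])).zip (bs ++ [i]) = ((h :: bs).zip bs) ++ [(bs.getLastD h, i)] := by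
  induction bs generalizing h with
  | nil => simp
  | cons c cs ih =>
      simp only [List.cons_append, List.zip_cons_cons, ih c, List.cons.injEq, true_and]
      cases cs with
      | nil => simp
      | cons d ds =>
          rw [List.getLastD_eq_getLast?, List.getLastD_eq_getLast?, getD_getLast?_cons,
              getD_getLast?_cons, List.getLast_cons (l := d :: ds) (by simp)]

theorem pairsOf_append (x y : List Int) (bs : List Int) (i : Int) :
    pairsOf x y (bs ++ [i]) =
      pairsOf x y bs ++ [(PySem.List.slice x (some (bs.getLastD 0)) (some i),
                          PySem.List.slice y (some (bs.getLastD 0)) (some i))] := by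
  simp [pairsOf, zip_pairs_append]

theorem step_comm (x y : List Int) (s : List Int × Int) (i : Int)
    (hs : s.2 = 0 ∨ s.2 = 1 ∨ s.2 = -1) :
    dvA_step x y (absB x y s) i = absB x y (dvO_step y s i) := by
  obtain ⟨bs, last⟩ := s
  simp only at hs
  rcases hs with rfl | rfl | rfl <;>
    by_cases h1 : PySem.List.pyGetD y i 0 > PySem.List.pyGetD y (i-1) 0 <;>
    by_cases h2 : PySem.List.pyGetD y i 0 < PySem.List.pyGetD y (i-1) 0 <;>
    simp [dvA_step, dvO_step, dvB_dir, absB, dirOpt, h1, h2, pairsOf_append] <;> omega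

theorem stepO_last (y : List Int) (s : List Int × Int) (i : Int)
    (hs : s.2 = 0 ∨ s.2 = 1 ∨ s.2 = -1) :
    (dvO_step y s i).2 = 0 ∨ (dvO_step y s i).2 = 1 ∨ (dvO_step y s i).2 = -1 := by
  unfold dvO_step dvB_dir
  split_ifs <;> simp_all

theorem fold_comm (x y : List Int) (L : List Int) :
    ∀ (s : List Int × Int), (s.2 = 0 ∨ s.2 = 1 ∨ s.2 = -1) →
      L.foldl (dvA_step x y) (absB x y s) = absB x y (L.foldl (dvO_step y) s) := by
  induction L with
  | nil => intro s _; simp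
  | cons i t ih =>
      intro s hs
      simp only [List.foldl_cons]
      rw [step_comm x y s i hs]
      exact ih _ (stepO_last y s i hs)

-- ===== bridge from the reference fold to B's pipeline =====

def sumC : List (Int × Int) → Int
  | [] => 0
  | r :: t => r.2 + sumC t

def lastV (R : List (Int × Int)) : Int := (R.getLastD (0, 0)).1

def bndAux (p : Int) : List (Int × Int) → List Int
  | [] => []
  | r :: t => p :: bndAux (p + r.2) t

def bnds : List (Int × Int) → List Int
  | [] => []
  | r :: t => bndAux (1 + r.2) t

def diffs (p : Int) : List Int → List Int
  | [] => []
  | b :: bs => (b - p) :: diffs b bs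

def sumL : List Int → Int
  | [] => 0
  | L :: t => L + sumL t

def segsFrom (x y : List Int) (p : Int) : List Int → List (List Int × List Int)
  | [] => []
  | L :: Ls => (PySem.List.slice x (some p) (some (p + L)),
                PySem.List.slice y (some p) (some (p + L))) :: segsFrom x y (p + L) Ls

theorem sumC_append (l l' : List (Int × Int)) : sumC (l ++ l') = sumC l + sumC l' := by
  induction l with
  | nil => simp [sumC]
  | cons r t ih => simp [sumC, ih]; ring

theorem lastV_addRun (R : List (Int × Int)) (v : Int) : lastV (dvB_addRun R v) = v := by
  unfold dvB_addRun
  cases h : R.getLast? with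
  | none => simp [lastV]
  | some r =>
      by_cases hv : r.1 = v <;> simp [hv, lastV]

theorem addRun_ne_nil (R : List (Int × Int)) (v : Int) : dvB_addRun R v ≠ [] := by
  unfold dvB_addRun
  cases h : R.getLast? with
  | none => simp
  | some r => by_cases hv : r.1 = v <;> simp [hv]

theorem sumC_dropLast (R : List (Int × Int)) (r : Int × Int) (h : R.getLast? = some r) :
    sumC R = sumC R.dropLast + r.2 := by
  have hne : R ≠ [] := by intro hn; simp [hn] at h
  have hg : some (R.getLast hne) = some r := by rw [← List.getLast?_eq_some_getLast hne]; exact h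
  calc sumC R = sumC (R.dropLast ++ [R.getLast hne]) := by rw [List.dropLast_append_getLast]
    _ = sumC R.dropLast + r.2 := by rw [Option.some.inj hg]; simp [sumC_append, sumC]

theorem sumC_addRun (R : List (Int × Int)) (v : Int) :
    sumC (dvB_addRun R v) = sumC R + 1 := by
  cases h : R.getLast? with
  | none =>
      have : R = [] := List.getLast?_eq_none_iff.mp h
      simp [this, sumC, dvB_addRun]
  | some r =>
      have hred : dvB_addRun R v = if r.1 = v then R.dropLast ++ [(r.1, r.2 + 1)] else R ++ [(v, 1)] := by
        unfold dvB_addRun; rw [h]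
      by_cases hv : r.1 = v
      · rw [hred, if_pos hv, sumC_append, sumC_dropLast R r h]; simp [sumC]; ring
      · rw [hred, if_neg hv, sumC_append]; simp [sumC]

theorem bndAux_concat (l : List (Int × Int)) (p : Int) (r : Int × Int) :
    bndAux p (l ++ [r]) = bndAux p l ++ [p + sumC l] := by
  induction l generalizing p with
  | nil => simp [bndAux, sumC]
  | cons a t ih => simp [bndAux, ih, sumC]; ring_nf

theorem bnds_concat (R : List (Int × Int)) (hR : R ≠ []) (r : Int × Int) :
    bnds (R ++ [r]) = bnds R ++ [1 + sumC R] := by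
  cases R with
  | nil => exact absurd rfl hR
  | cons a t => simp [bnds, bndAux_concat, sumC]; ring_nf

theorem bndAux_inc (l : List (Int × Int)) (p : Int) (r : Int × Int) (h : l.getLast? = some r) :
    bndAux p (l.dropLast ++ [(r.1, r.2 + 1)]) = bndAux p l := by
  have hne : l ≠ [] := by intro hn; simp [hn] at h
  have hg : some (l.getLast hne) = some r := by rw [← List.getLast?_eq_some_getLast hne]; exact h
  have hl : l = l.dropLast ++ [r] := by
    rw [← Option.some.inj hg, List.dropLast_append_getLast]
  rw [bndAux_concat]
  conv_rhs => rw [hl, bndAux_concat]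

theorem bnds_inc (R : List (Int × Int)) (r : Int × Int) (h : R.getLast? = some r) :
    bnds (R.dropLast ++ [(r.1, r.2 + 1)]) = bnds R := by
  cases R with
  | nil => simp at h
  | cons a t =>
      cases t with
      | nil =>
          simp at h
          simp [h, bnds, bndAux]
      | cons b u =>
          have ht : (b :: u).getLast? = some r := by
            rw [List.getLast?_cons_cons] at h; exact h
          simp only [List.dropLast_cons_of_ne_nil (by simp : (b :: u) ≠ []), List.cons_append,
            bnds]
          exact bndAux_inc (b :: u) (1 + a.2) r ht

theorem bnds_addRun_eq (R : List (Int × Int)) (r : Int × Int) (h : R.getLast? = some r)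
    (v : Int) (hv : r.1 = v) : bnds (dvB_addRun R v) = bnds R := by
  unfold dvB_addRun
  rw [h]
  simp only [hv]
  rw [← hv]
  exact bnds_inc R r h

theorem bnds_addRun_ne (R : List (Int × Int)) (r : Int × Int) (h : R.getLast? = some r)
    (v : Int) (hv : r.1 ≠ v) : bnds (dvB_addRun R v) = bnds R ++ [1 + sumC R] := by
  unfold dvB_addRun
  rw [h]
  simp only [hv]
  exact bnds_concat R (by intro hn; simp [hn] at h) _

theorem first_concat (l : List Int) (d : Int) :
    dvB_first (l ++ [d]) = if dvB_first l ≠ 0 then dvB_first l else d := by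
  induction l with
  | nil => by_cases hd : d = 0 <;> simp [dvB_first, hd]
  | cons a t ih =>
      by_cases ha : a = 0
      · simp [dvB_first, ha, ih]
      · simp [dvB_first, ha]

theorem first_zero_all (l : List Int) (h : dvB_first l = 0) : ∀ d ∈ l, d = 0 := by
  induction l with
  | nil => simp
  | cons a t ih =>
      by_cases ha : a = 0
      · simp [dvB_first, ha] at h
        intro d hd
        rcases List.mem_cons.mp hd with rfl | hd
        · exact ha
        · exact ih h d hd
      · simp [dvB_first, ha] at h

theorem fill_zeros (l : List Int) (h : ∀ d ∈ l, d = 0) (p : Int) (acc : List Int) :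
    l.foldl dvB_fillStep (p, acc) = (p, acc ++ List.replicate l.length p) := by
  induction l generalizing acc with
  | nil => simp
  | cons a t ih =>
      have ha : a = 0 := h a (by simp)
      have ht : ∀ d ∈ t, d = 0 := fun d hd => h d (by simp [hd])
      have hstep : dvB_fillStep (p, acc) a = (p, acc ++ [p]) := by simp [dvB_fillStep, ha]
      rw [List.foldl_cons, hstep, ih ht]
      simp [List.replicate_succ]

theorem rle_replicate_aux (i : Nat) (v : Int) (j : Int) :
    (List.replicate i v).foldl dvB_addRun [(v, j)] = [(v, j + i)] := by
  induction i generalizing j with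
  | zero => simp
  | succ n ih =>
      simp only [List.replicate_succ, List.foldl_cons]
      have : dvB_addRun [(v, j)] v = [(v, j + 1)] := by simp [dvB_addRun]
      rw [this, ih]
      norm_num
      ring_nf

theorem rle_replicate (i : Nat) (v : Int) :
    (List.replicate i v).foldl dvB_addRun [] = if i = 0 then [] else [(v, (i : Int))] := by
  cases i with
  | zero => simp
  | succ n =>
      simp only [List.replicate_succ, List.foldl_cons]
      have : dvB_addRun [] v = [(v, 1)] := by simp [dvB_addRun]
      rw [this, rle_replicate_aux]
      simp
      ring_nf

-- the pipeline state after the indices in 'pyRange 1 k 1'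
def dsUpTo (y : List Int) (k : Int) : List Int :=
  (PySem.List.pyRange 1 k 1).map (dvB_dir y)

def dvPipeInv (y : List Int) (k : Int) : Prop :=
  ((PySem.List.pyRange 1 k 1).foldl (dvO_step y) ([], 0)).1 = bnds (dvB_runs (dsUpTo y k)) ∧
  ((PySem.List.pyRange 1 k 1).foldl (dvO_step y) ([], 0)).2 = lastV (dvB_runs (dsUpTo y k)) ∧
  sumC (dvB_runs (dsUpTo y k)) = k - 1 ∧
  (dvB_fill (dsUpTo y k)).1 = lastV (dvB_runs (dsUpTo y k)) ∧
  (dvB_first (dsUpTo y k) = 0 ∨ lastV (dvB_runs (dsUpTo y k)) ≠ 0) ∧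
  (dsUpTo y k = [] → dvB_runs (dsUpTo y k) = []) ∧
  (dsUpTo y k ≠ [] → dvB_runs (dsUpTo y k) ≠ [])

theorem dvO_step_tie (y : List Int) (s : List Int × Int) (i : Int) (h : dvB_dir y i = 0) :
    dvO_step y s i = s := by
  unfold dvO_step; simp [h]

theorem dvO_step_zero (y : List Int) (s : List Int × Int) (i : Int) (h : s.2 = 0) :
    dvO_step y s i = (s.1, dvB_dir y i) := by
  obtain ⟨a, b⟩ := s
  simp only at h
  subst h
  unfold dvO_step
  by_cases hd : dvB_dir y i = 0 <;> simp [hd]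

theorem dvO_step_same (y : List Int) (s : List Int × Int) (i : Int) (h : dvB_dir y i ≠ 0)
    (h2 : s.2 = dvB_dir y i) : dvO_step y s i = (s.1, dvB_dir y i) := by
  unfold dvO_step
  simp [h, h2]

theorem dvO_step_flip (y : List Int) (s : List Int × Int) (i : Int) (h : dvB_dir y i ≠ 0)
    (h0 : s.2 ≠ 0) (hne : dvB_dir y i ≠ s.2) : dvO_step y s i = (s.1 ++ [i], dvB_dir y i) := by
  unfold dvO_step
  simp [h, h0, hne]

theorem inv_holds (y : List Int) (m : Nat) : dvPipeInv y (1 + (m : Int)) := by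
  induction m with
  | zero =>
      have h : PySem.List.pyRange 1 (1 + (0 : Int)) 1 = [] := PySem.List.pyRange_one_eq_nil (by omega)
      refine ⟨?_, ?_, ?_, ?_, ?_, ?_, ?_⟩ <;>
        simp [dsUpTo, dvB_runs, dvB_fill, bnds, lastV, sumC, dvB_first]
  | succ n ih =>
      have hk : (1 : Int) ≤ 1 + (n : Int) := by omega
      have hcast : (1 + ((n + 1 : Nat) : Int)) = (1 + (n : Int)) + 1 := by push_cast; ring
      rw [hcast]
      unfold dvPipeInv
      have hrange : PySem.List.pyRange 1 ((1 + (n : Int)) + 1) 1 =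
          PySem.List.pyRange 1 (1 + (n : Int)) 1 ++ [1 + (n : Int)] :=
        PySem.List.pyRange_one_succ_right hk
      have hds : dsUpTo y ((1 + (n : Int)) + 1) =
          dsUpTo y (1 + (n : Int)) ++ [dvB_dir y (1 + (n : Int))] := by
        simp [dsUpTo, hrange]
      obtain ⟨ih1, ih2, ih3, ih4, ih5, ih6, ih7⟩ := ih
      set k : Int := 1 + (n : Int) with hkdef
      set ds := dsUpTo y k with hdsdef
      set st := (PySem.List.pyRange 1 k 1).foldl (dvO_step y) ([], 0) with hstdef
      have hstep : (PySem.List.pyRange 1 (k + 1) 1).foldl (dvO_step y) ([], 0) = dvO_step y st k := by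
        rw [hrange, List.foldl_append]; rfl
      have hlen : ((ds.length : Int)) = k - 1 := by
        rw [hdsdef]
        simp [dsUpTo, PySem.List.length_pyRange_one]
        omega
      by_cases hz : dvB_first ds = 0
      · -- warm-up: every direction so far is a tie
        have hall : ∀ e ∈ ds, e = 0 := first_zero_all ds hz
        have hfirst' : dvB_first (ds ++ [dvB_dir y k]) = dvB_dir y k := by
          rw [first_concat]; simp [hz]
        have hfill' : dvB_fill (ds ++ [dvB_dir y k]) =
            (dvB_dir y k, List.replicate (ds.length + 1) (dvB_dir y k)) := by
          unfold dvB_fill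
          rw [hfirst', List.foldl_append, fill_zeros ds hall (dvB_dir y k) []]
          simp [dvB_fillStep, List.replicate_succ']
        have hR' : dvB_runs (ds ++ [dvB_dir y k]) =
            [(dvB_dir y k, ((ds.length + 1 : Nat) : Int))] := by
          unfold dvB_runs
          rw [hfill']
          simp only
          rw [rle_replicate]
          simp
        have hRex : dvB_runs ds = if ds.length = 0 then [] else [(0, ((ds.length : Nat) : Int))] := by
          unfold dvB_runs dvB_fill
          rw [hz, fill_zeros ds hall 0 []]
          simp only [List.nil_append]
          exact rle_replicate ds.length 0
        have hlv : lastV (dvB_runs ds) = 0 := by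
          rw [hRex]; split_ifs <;> simp [lastV]
        have hb : bnds (dvB_runs ds) = [] := by
          rw [hRex]; split_ifs <;> simp [bnds, bndAux]
        have hst' : dvO_step y st k = (st.1, dvB_dir y k) :=
          dvO_step_zero y st k (ih2.trans hlv)
        rw [hds, hstep, hst', hR']
        refine ⟨?_, ?_, ?_, ?_, ?_, ?_, ?_⟩
        · rw [ih1, hb]; simp [bnds, bndAux]
        · simp [lastV]
        · simp only [sumC]
          push_cast
          omega
        · rw [hfill']; simp [lastV]
        · by_cases hd : dvB_dir y k = 0
          · left; rw [hfirst']; exact hd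
          · right; simp [lastV, hd]
        · simp
        · simp
      · -- a real direction has already been seen
        have hdsne : ds ≠ [] := by
          intro hnil; rw [hnil] at hz; exact hz rfl
        have hRne : dvB_runs ds ≠ [] := ih7 hdsne
        have hg : (dvB_runs ds).getLast? = some ((dvB_runs ds).getLast hRne) :=
          List.getLast?_eq_some_getLast hRne
        have hr1 : lastV (dvB_runs ds) = ((dvB_runs ds).getLast hRne).1 := by
          rw [lastV, List.getLastD_eq_getLast?, hg]; rfl
        have hlvne : lastV (dvB_runs ds) ≠ 0 := Or.resolve_left ih5 hz
        have hfirst' : dvB_first (ds ++ [dvB_dir y k]) = dvB_first ds := by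
          rw [first_concat]; simp [hz]
        have hfold1 : dvB_fill (ds ++ [dvB_dir y k]) = dvB_fillStep (dvB_fill ds) (dvB_dir y k) := by
          unfold dvB_fill
          rw [hfirst', List.foldl_append]
          simp
        have hfill' : dvB_fill (ds ++ [dvB_dir y k]) =
            ((if dvB_dir y k ≠ 0 then dvB_dir y k else lastV (dvB_runs ds)),
             (dvB_fill ds).2 ++ [if dvB_dir y k ≠ 0 then dvB_dir y k else lastV (dvB_runs ds)]) := by
          rw [hfold1]
          simp [dvB_fillStep, ih4]
        have hR' : dvB_runs (ds ++ [dvB_dir y k]) =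
            dvB_addRun (dvB_runs ds) (if dvB_dir y k ≠ 0 then dvB_dir y k else lastV (dvB_runs ds)) := by
          unfold dvB_runs
          rw [hfill']
          simp only
          rw [List.foldl_append]
          rfl
        rw [hds, hstep, hR']
        by_cases hd : dvB_dir y k = 0
        · -- tie: forward-fill repeats the last direction; the last run just grows
          have hp : (if dvB_dir y k ≠ 0 then dvB_dir y k else lastV (dvB_runs ds)) =
              ((dvB_runs ds).getLast hRne).1 := by
            rw [if_neg (by simp [hd]), hr1]
          have hst' : dvO_step y st k = st := dvO_step_tie y st k hd
          rw [hst', hp]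
          refine ⟨?_, ?_, ?_, ?_, ?_, ?_, ?_⟩
          · rw [ih1, bnds_addRun_eq _ _ hg _ rfl]
          · rw [ih2, lastV_addRun, hr1]
          · rw [sumC_addRun, ih3]; ring
          · rw [hfill', hp]; simp [lastV_addRun]
          · right; rw [lastV_addRun, ← hr1]; exact hlvne
          · simp
          · intro _; exact addRun_ne_nil _ _
        · have hp : (if dvB_dir y k ≠ 0 then dvB_dir y k else lastV (dvB_runs ds)) = dvB_dir y k :=
            if_pos hd
          rw [hp]
          by_cases heq : ((dvB_runs ds).getLast hRne).1 = dvB_dir y k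
          · -- same direction: the last run grows and no break is recorded
            have hst' : dvO_step y st k = (st.1, dvB_dir y k) :=
              dvO_step_same y st k hd (by rw [ih2, hr1, heq])
            rw [hst']
            refine ⟨?_, ?_, ?_, ?_, ?_, ?_, ?_⟩
            · rw [ih1, bnds_addRun_eq _ _ hg _ heq]
            · rw [lastV_addRun]
            · rw [sumC_addRun, ih3]; ring
            · rw [hfill', hp]; simp [lastV_addRun]
            · right; rw [lastV_addRun]; exact hd
            · simp
            · intro _; exact addRun_ne_nil _ _
          · -- direction flip: a new run starts and the reference fold records a break
            have hst' : dvO_step y st k = (st.1 ++ [k], dvB_dir y k) :=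
              dvO_step_flip y st k hd (by rw [ih2]; exact hlvne)
                (by rw [ih2, hr1]; intro hc; exact heq hc.symm)
            rw [hst']
            refine ⟨?_, ?_, ?_, ?_, ?_, ?_, ?_⟩
            · rw [ih1, bnds_addRun_ne _ _ hg _ heq, ih3]
              have h1k : 1 + (k - 1) = k := by ring
              rw [h1k]
            · rw [lastV_addRun]
            · rw [sumC_addRun, ih3]; ring
            · rw [hfill', hp]; simp [lastV_addRun]
            · right; rw [lastV_addRun]; exact hd
            · simp
            · intro _; exact addRun_ne_nil _ _

theorem cut_fold (x y : List Int) (Ls : List Int) :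
    ∀ (acc : List (List Int × List Int)) (p : Int),
      Ls.foldl (dvB_cut x y) (acc, p) = (acc ++ segsFrom x y p Ls, p + sumL Ls) := by
  induction Ls with
  | nil => intro acc p; simp [segsFrom, sumL]
  | cons L t ih =>
      intro acc p
      simp only [List.foldl_cons, dvB_cut]
      rw [ih]
      simp [segsFrom, sumL]
      ring_nf

theorem segsFrom_diffs (x y : List Int) (bs : List Int) :
    ∀ p, segsFrom x y p (diffs p bs) =
      ((p :: bs).zip bs).map
        (fun q => (PySem.List.slice x (some q.1) (some q.2), PySem.List.slice y (some q.1) (some q.2))) := by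
  induction bs with
  | nil => intro p; simp [diffs, segsFrom]
  | cons b t ih =>
      intro p
      simp only [diffs, segsFrom, List.zip_cons_cons, List.map_cons]
      rw [show p + (b - p) = b by ring, ih b]

theorem sumL_diffs (bs : List Int) : ∀ p, p + sumL (diffs p bs) = bs.getLastD p := by
  induction bs with
  | nil => intro p; simp [diffs, sumL]
  | cons b t ih =>
      intro p
      simp only [diffs, sumL, List.getLastD_cons]
      rw [show p + ((b - p) + sumL (diffs b t)) = b + sumL (diffs b t) by ring, ih b]

theorem diffs_bndAux (rs : List (Int × Int)) :
    ∀ p q, diffs q (bndAux p rs) =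
      if rs = [] then [] else (p - q) :: (rs.map (·.2)).dropLast := by
  induction rs with
  | nil => intro p q; simp [bndAux, diffs]
  | cons a t ih =>
      intro p q
      simp only [bndAux, diffs, ih (p + a.2) p]
      by_cases ht : t = []
      · simp [ht]
      · simp only [ht, if_neg (by simp : (a :: t) ≠ [])]
        simp only [List.map_cons]
        rw [List.dropLast_cons_of_ne_nil (by simpa using ht)]
        norm_num

theorem diffs_bnds (R : List (Int × Int)) (hR : R ≠ []) (n : Int) :
    diffs 0 (bnds R) = (dvB_lens n R).dropLast := by
  cases R with
  | nil => exact absurd rfl hR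
  | cons r t =>
      simp only [bnds, dvB_lens]
      rw [diffs_bndAux t (1 + r.2) 0]
      by_cases ht : t = []
      · simp [ht]
      · simp only [ht]
        rw [List.dropLast_cons_of_ne_nil (by simpa using ht)]
        norm_num
        ring_nf

theorem divide_vectors_eq_pairs (x y : List Int) :
    divide_vectors x y =
      pairsOf x y (((PySem.List.pyRange 1 (y.length : Int) 1).foldl (dvO_step y) ([], 0)).1) ++
        [(PySem.List.slice x (some ((((PySem.List.pyRange 1 (y.length : Int) 1).foldl (dvO_step y) ([], 0)).1).getLastD 0)) none,
          PySem.List.slice y (some ((((PySem.List.pyRange 1 (y.length : Int) 1).foldl (dvO_step y) ([], 0)).1).getLastD 0)) none)] := by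
  unfold divide_vectors
  have hA := fold_comm x y (PySem.List.pyRange 1 (y.length : Int) 1) ([], 0) (by simp)
  have habs : absB x y ([], 0) = ([], 0, none) := by simp [absB, pairsOf, dirOpt]
  rw [habs] at hA
  simp only [hA, absB]

theorem alt_eq_pairs (x y : List Int) (hR : dvB_runs (dvB_dirs y) ≠ []) :
    divide_vectors_alt x y =
      pairsOf x y (bnds (dvB_runs (dvB_dirs y))) ++
        [(PySem.List.slice x (some ((bnds (dvB_runs (dvB_dirs y))).getLastD 0)) none,
          PySem.List.slice y (some ((bnds (dvB_runs (dvB_dirs y))).getLastD 0)) none)] := by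
  have key : divide_vectors_alt x y =
      (((PySem.List.slice (dvB_lens ((y.length : Int)) (dvB_runs (dvB_dirs y))) none
            (some (-1))).foldl (dvB_cut x y) ([], 0)).1) ++
        [(PySem.List.slice x (some (((PySem.List.slice (dvB_lens ((y.length : Int))
              (dvB_runs (dvB_dirs y))) none (some (-1))).foldl (dvB_cut x y) ([], 0)).2)) none,
          PySem.List.slice y (some (((PySem.List.slice (dvB_lens ((y.length : Int))
              (dvB_runs (dvB_dirs y))) none (some (-1))).foldl (dvB_cut x y) ([], 0)).2)) none)] := rfl
  rw [key, PySem.List.slice_to_neg_one,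
      ← diffs_bnds (dvB_runs (dvB_dirs y)) hR ((y.length : Int)),
      cut_fold x y _ [] 0]
  rw [segsFrom_diffs x y (bnds (dvB_runs (dvB_dirs y))) 0,
      sumL_diffs (bnds (dvB_runs (dvB_dirs y))) 0]
  simp [pairsOf]

-- ===== VERDICT (by name: the statement is the Claim_ definition above) =====
theorem divide_vectors_spec : Claim_equal_divide_vectors := by
  intro x y _
  unfold Spec_divide_vectors
  by_cases hsmall : (y.length : Int) ≤ 1
  · have hempty : PySem.List.pyRange 1 (y.length : Int) 1 = [] :=
      PySem.List.pyRange_one_eq_nil hsmall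
    unfold divide_vectors divide_vectors_alt
    simp [hempty, dvB_dirs, dvB_runs, dvB_fill, dvB_first, dvB_lens,
      PySem.List.slice_to_neg_one]
  · rw [not_le] at hsmall
    have hcast : 1 + ((((y.length : Int) - 1).toNat : Int)) = (y.length : Int) := by
      rw [Int.toNat_of_nonneg (by omega)]; ring
    have inv := inv_holds y (((y.length : Int) - 1)).toNat
    rw [hcast] at inv
    obtain ⟨i1, _, _, _, _, _, i7⟩ := inv
    have hdsne : dsUpTo y (y.length : Int) ≠ [] := by
      have : PySem.List.pyRange 1 (y.length : Int) 1 =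
          1 :: PySem.List.pyRange 2 (y.length : Int) 1 := by
        have := PySem.List.pyRange_one_cons (a := 1) (b := (y.length : Int)) (by omega)
        simpa using this
      simp [dsUpTo, this]
    have hRne : dvB_runs (dsUpTo y (y.length : Int)) ≠ [] := i7 hdsne
    have hdirs : dvB_dirs y = dsUpTo y (y.length : Int) := rfl
    rw [divide_vectors_eq_pairs, alt_eq_pairs x y (by rw [hdirs]; exact hRne), hdirs, i1]
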